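-- pv_equiv track=rewrite | github.com/pypi-data/pypi-mirror-298 | packages/sakthiselvan/sakthiselvan-0.1.0.tar.gz/sakthiselvan-0.1.0/src/sakthiselvan/example.py | sakthi_clean_front_and_back
-- ===== SOURCE A (Python) =====
-- def sakthi_clean_front_and_back(dirty_texts):
--     """Removing the leading and trailing whitespace from string"""
--     #defining a set to hold alll the whitespace characters
--     if dirty_texts:
--         whitespace = {' ', '\t', '\n', '\f', '\r','\v'}
--
--         # defining a variable to start where with characters
--         # negulecting the whitespace
--         start = 0
--
--         #defining a flag with active state
--         active = True
--         #while loop to move the 'start' to where the character is persent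
--         while active:
--             #conditional test to check whether the character is whitespace
--             if start < len(dirty_texts) and dirty_texts[start] in whitespace:
--                 start = start + 1
--
--             else:
--                 active = False
--
--         #define a 'end' variable to hold the index of character ending not whitespace not ending
--         end = len(dirty_texts) - 1
--
--         # again chage the state of active to 'True'
--         active = True
--
--         #while loop to move the 'end' to where the character is persent
--         while active:
--             #conditional test to check whether the character is whitespace
--             if end >= start and dirty_texts[end] in whitespace:
--                 end = end - 1
--
--             else:
--                 active = False
--
--         clean_string = dirty_texts[start : end+1]
--         # Returning the string with no whitespace at fron and back
--         return clean_string
-- ===== SOURCE B (Python) =====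
-- def sakthi_clean_front_and_back(dirty_texts):
--     """Removing the leading and trailing whitespace from string"""
--     if not dirty_texts:
--         return None
--     whitespace = {' ', '\t', '\n', '\f', '\r', '\v'}
--     kept = []
--     pending = []
--     for ch in dirty_texts:
--         if ch in whitespace:
--             if kept:
--                 pending.append(ch)
--         else:
--             kept.extend(pending)
--             kept.append(ch)
--             pending = []
--     return ''.join(kept)
-- ===== Notes on version B (the rewrite author's own statement) =====
-- stated objective: alternative
-- what changed: Replaced the two directional index-moving while-loops plus a slice by a single forward pass that buffers interior whitespace in a pending list and flushes it on each non-whitespace character, joining the kept characters at the end.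
import Mathlib
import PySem

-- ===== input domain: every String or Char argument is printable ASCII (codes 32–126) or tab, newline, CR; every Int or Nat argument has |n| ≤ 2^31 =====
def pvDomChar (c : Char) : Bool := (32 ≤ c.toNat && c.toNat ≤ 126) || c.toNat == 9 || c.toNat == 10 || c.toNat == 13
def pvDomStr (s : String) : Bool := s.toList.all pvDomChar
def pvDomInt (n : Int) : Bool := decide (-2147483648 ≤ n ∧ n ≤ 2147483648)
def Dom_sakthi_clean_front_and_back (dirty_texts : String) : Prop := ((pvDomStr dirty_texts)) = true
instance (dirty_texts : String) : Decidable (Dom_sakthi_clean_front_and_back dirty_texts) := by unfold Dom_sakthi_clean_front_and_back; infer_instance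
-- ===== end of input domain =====

-- B replaces A's two directional index-moving scans + slice by one forward pass with a
-- pending-whitespace buffer; same return value everywhere (none for "", "" for all-whitespace).

-- ===== PORT A =====
-- the explicit 6-character whitespace set of the Python source
def pvWs (c : Char) : Bool :=
  c = ' ' || c = '\t' || c = '\n' || c = '\x0c' || c = '\r' || c = '\x0b'

-- first while loop: advance `start` while it points at whitespace (short-circuit `and`)
def pvFindStart (s : List Char) (start : Nat) : Nat :=
  if h : start < s.length then
    if pvWs s[start] then pvFindStart s (start + 1) else start
  else start
termination_by s.length - start

-- second while loop; `e` stands for `end + 1` (Python's `end` never goes below 0 here,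
-- see the guard `end >= start`); `getD` is exact since `e - 1 < s.length` whenever taken
def pvFindEnd (s : List Char) (start e : Nat) : Nat :=
  if start < e && pvWs (s.getD (e - 1) ' ') then pvFindEnd s start (e - 1) else e
termination_by e
decreasing_by rename_i hg; simp at hg; omega

def sakthi_clean_front_and_back (dirty_texts : String) : Option String :=
  let chars := dirty_texts.toList
  if chars = [] then none            -- falsy string: Python falls off the end, returns None
  else
    let start := pvFindStart chars 0
    let e := pvFindEnd chars start chars.length
    some (String.ofList (PySem.List.slice chars (some (start : Int)) (some (e : Int))))

-- ===== PORT B =====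
-- one forward pass: `kept` = output so far, `pending` = interior whitespace not yet flushed
def pvTrimLoop (kept pending : List Char) : List Char → List Char
  | [] => kept
  | c :: t =>
    if pvWs c then
      if kept = [] then pvTrimLoop kept pending t
      else pvTrimLoop kept (pending ++ [c]) t
    else pvTrimLoop (kept ++ pending ++ [c]) [] t

def sakthi_clean_front_and_back_alt (dirty_texts : String) : Option String :=
  if dirty_texts.toList = [] then none
  else some (String.ofList (pvTrimLoop [] [] dirty_texts.toList))

-- ===== PRECONDITION & SPEC =====
def Spec_sakthi_clean_front_and_back (dirty_texts : String) (out : Option String) : Prop := out = sakthi_clean_front_and_back_alt dirty_texts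
instance (dirty_texts : String) (out : Option String) : Decidable (Spec_sakthi_clean_front_and_back dirty_texts out) := by unfold Spec_sakthi_clean_front_and_back; infer_instance

-- ===== CLAIM (what is proved, stated in full; the proofs are below) =====
def Claim_equal_sakthi_clean_front_and_back : Prop := ∀ (dirty_texts : String), Dom_sakthi_clean_front_and_back dirty_texts → Spec_sakthi_clean_front_and_back dirty_texts (sakthi_clean_front_and_back dirty_texts)

-- ===== LEMMAS AND PROOFS =====

-- right trim: drop trailing pvWs characters
def pvRtrim (l : List Char) : List Char := (l.reverse.dropWhile pvWs).reverse

theorem pvRtrim_cons_ne (c : Char) (t : List Char) (h : pvRtrim t ≠ []) :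
    pvRtrim (c :: t) = c :: pvRtrim t := by
  have h' : ¬ (t.reverse.dropWhile pvWs).isEmpty := by
    simp only [List.isEmpty_iff]
    intro h0; apply h; simp [pvRtrim, h0]
  simp [pvRtrim, List.dropWhile_append, h']

theorem pvRtrim_cons_nil (c : Char) (t : List Char) (h : pvRtrim t = []) :
    pvRtrim (c :: t) = if pvWs c then [] else [c] := by
  have h0 : t.reverse.dropWhile pvWs = [] := by
    have := congrArg List.reverse h; simpa [pvRtrim] using this
  by_cases hc : pvWs c <;>
    simp [pvRtrim, List.dropWhile_append, h0, hc]

theorem pvTrimLoop_ne (l : List Char) : ∀ kept pending : List Char, kept ≠ [] →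
    pvTrimLoop kept pending l
      = kept ++ (if pvRtrim l = [] then [] else pending ++ pvRtrim l) := by
  induction l with
  | nil => intro kept pend h; simp [pvTrimLoop, pvRtrim]
  | cons c t ih =>
    intro kept pend h
    by_cases hc : pvWs c
    · rw [pvTrimLoop, if_pos hc, if_neg h, ih _ _ h]
      by_cases h0 : pvRtrim t = []
      · rw [pvRtrim_cons_nil c t h0]
        simp [h0, hc]
      · rw [pvRtrim_cons_ne c t h0]
        simp [h0]
    · rw [pvTrimLoop, if_neg hc, ih _ _ (by simp)]
      by_cases h0 : pvRtrim t = []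
      · rw [pvRtrim_cons_nil c t h0]
        simp [h0, hc]
      · rw [pvRtrim_cons_ne c t h0]
        simp [h0]

theorem pvTrimLoop_nil (l : List Char) :
    pvTrimLoop [] [] l = pvRtrim (l.dropWhile pvWs) := by
  induction l with
  | nil => simp [pvTrimLoop, pvRtrim]
  | cons c t ih =>
    by_cases hc : pvWs c
    · rw [pvTrimLoop, if_pos hc, if_pos rfl, ih, List.dropWhile_cons_of_pos hc]
    · rw [pvTrimLoop, if_neg hc, List.dropWhile_cons_of_neg hc,
        pvTrimLoop_ne t _ _ (by simp)]
      by_cases h0 : pvRtrim t = []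
      · rw [pvRtrim_cons_nil c t h0]; simp [h0, hc]
      · rw [pvRtrim_cons_ne c t h0]; simp [h0]

theorem pvFindStart_eq (s : List Char) (i : Nat) :
    pvFindStart s i = i + ((s.drop i).takeWhile pvWs).length := by
  rw [pvFindStart]
  split
  · rename_i h
    rw [List.drop_eq_getElem_cons h, List.takeWhile_cons]
    by_cases hw : pvWs s[i]
    · rw [if_pos hw, if_pos hw, pvFindStart_eq s (i + 1)]
      simp; omega
    · simp [hw]
  · rename_i h
    rw [List.drop_eq_nil_of_le (by omega)]
    simp
termination_by s.length - i

-- length kept after the trailing-run removal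
def pvRtl (l : List Char) : Nat := l.length - (l.reverse.takeWhile pvWs).length

theorem pvRtl_concat (l : List Char) (c : Char) :
    pvRtl (l ++ [c]) = if pvWs c then pvRtl l else l.length + 1 := by
  by_cases hw : pvWs c <;>
    simp [pvRtl, hw]

theorem pvFindEnd_eq (s : List Char) (start e : Nat) (h1 : start ≤ e) (h2 : e ≤ s.length) :
    pvFindEnd s start e = start + pvRtl ((s.take e).drop start) := by
  rw [pvFindEnd]
  by_cases hg : start < e
  · have he1 : e - 1 < s.length := by omega
    have hgd : s.getD (e - 1) ' ' = s[e - 1] := List.getD_eq_getElem s ' ' he1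
    have hsplit : (s.take e).drop start = (s.take (e - 1)).drop start ++ [s[e - 1]] := by
      have ht : s.take e = s.take (e - 1) ++ [s[e - 1]] := by
        conv_lhs => rw [show e = (e - 1) + 1 by omega]
        rw [List.take_add_one, List.getElem?_eq_getElem he1]
        rfl
      rw [ht, List.drop_append_of_le_length (by simp; omega)]
    by_cases hw : pvWs s[e - 1]
    · rw [if_pos (by simp [hg, List.getElem?_eq_getElem he1, hw]),
        pvFindEnd_eq s start (e - 1) (by omega) (by omega), hsplit, pvRtl_concat,
        if_pos hw]
    · rw [if_neg (by simp [List.getElem?_eq_getElem he1, hw]), hsplit, pvRtl_concat, if_neg hw]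
      have hlen : ((s.take (e - 1)).drop start).length = e - 1 - start := by
        simp; try omega
      omega
  · rw [if_neg (by simp [hg])]
    have he : e = start := by omega
    subst he
    rw [List.drop_eq_nil_of_le (by simp; try omega)]
    simp [pvRtl]

theorem pvRtl_eq_length (l : List Char) : pvRtl l = (pvRtrim l).length := by
  have := congrArg List.length
    (List.takeWhile_append_dropWhile (p := pvWs) (l := l.reverse))
  simp only [List.length_append, List.length_reverse] at this
  simp [pvRtl, pvRtrim]
  omega

theorem pvTake_rtl (l : List Char) : l.take (pvRtl l) = pvRtrim l := by
  have hd : l = pvRtrim l ++ (l.reverse.takeWhile pvWs).reverse := by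
    have h2 := congrArg List.reverse
      (List.takeWhile_append_dropWhile (p := pvWs) (l := l.reverse))
    simp only [List.reverse_append, List.reverse_reverse] at h2
    unfold pvRtrim
    exact h2.symm
  calc l.take (pvRtl l)
      = List.take (pvRtrim l).length l := by rw [pvRtl_eq_length]
    _ = List.take (pvRtrim l).length (pvRtrim l ++ (l.reverse.takeWhile pvWs).reverse) :=
        congrArg _ hd
    _ = pvRtrim l := List.take_left

-- ===== VERDICT (by name: the statement is the Claim_ definition above) =====
theorem sakthi_clean_front_and_back_spec : Claim_equal_sakthi_clean_front_and_back := by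
  intro s _
  unfold Spec_sakthi_clean_front_and_back
  unfold sakthi_clean_front_and_back sakthi_clean_front_and_back_alt
  by_cases h : s.toList = []
  · simp [h]
  · simp only [h, ite_false]
    apply congrArg some
    apply congrArg String.ofList
    rw [pvTrimLoop_nil, PySem.List.slice_natCast]
    have hstart : pvFindStart s.toList 0 = (s.toList.takeWhile pvWs).length := by
      simpa using pvFindStart_eq s.toList 0
    have hdrop : s.toList.drop (pvFindStart s.toList 0) = s.toList.dropWhile pvWs := by
      rw [hstart]
      calc List.drop (s.toList.takeWhile pvWs).length s.toList
          = List.drop (s.toList.takeWhile pvWs).length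
              (s.toList.takeWhile pvWs ++ s.toList.dropWhile pvWs) := by
            rw [List.takeWhile_append_dropWhile]
        _ = s.toList.dropWhile pvWs := List.drop_left
    have hle : pvFindStart s.toList 0 ≤ s.toList.length := by
      rw [hstart]
      have := congrArg List.length
        (List.takeWhile_append_dropWhile (p := pvWs) (l := s.toList))
      simp only [List.length_append] at this
      omega
    have hend := pvFindEnd_eq s.toList (pvFindStart s.toList 0) s.toList.length hle le_rfl
    rw [List.take_length] at hend
    rw [hend, hdrop]
    have harith : pvFindStart s.toList 0 + pvRtl (s.toList.dropWhile pvWs)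
        - pvFindStart s.toList 0 = pvRtl (s.toList.dropWhile pvWs) := by omega
    rw [harith, pvTake_rtl]
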